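-- pv_equiv track=rewrite | github.com/Khush-Ojha/GIT-intelligent-issue-triage | scripts/collect_data.py | find_matching_label
-- ===== SOURCE A (Python) =====
-- LABEL_KEYWORDS = {
--     'bug': ['bug', 'defect', 'error', 'issue'],
--     'enhancement': ['enhancement', 'feature', 'feat', 'suggestion'],
--     'documentation': ['documentation', 'docs'],
--     'question': ['question', 'help', 'support']
-- }
--
-- def find_matching_label(issue_labels):
--     found_categories = set()
--     for label in issue_labels:
--         label_lower = label.lower()
--         for category, keywords in LABEL_KEYWORDS.items():
--             for keyword in keywords:
--                 if f' {keyword} ' in f' {label_lower} ' or label_lower == keyword: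
--                     found_categories.add(category)
--     if len(found_categories) == 1:
--         return found_categories.pop()
--     return None
-- ===== SOURCE B (Python) =====
-- LABEL_KEYWORDS = {
--     'bug': ['bug', 'defect', 'error', 'issue'],
--     'enhancement': ['enhancement', 'feature', 'feat', 'suggestion'],
--     'documentation': ['documentation', 'docs'],
--     'question': ['question', 'help', 'support']
-- }
--
-- _REVERSE = {kw: cat for cat, kws in LABEL_KEYWORDS.items() for kw in kws}
--
-- def find_matching_label(issue_labels):
--     found_categories = set()
--     for label in issue_labels:
--         for token in label.lower().split(' '):
--             cat = _REVERSE.get(token)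
--             if cat is not None:
--                 found_categories.add(cat)
--     if len(found_categories) == 1:
--         return found_categories.pop()
--     return None
-- ===== Notes on version B (the rewrite author's own statement) =====
-- stated objective: faster
-- what changed: A tests every label against all 14 keywords with padded-substring searches in three nested loops; B builds a reverse keyword-to-category dict once and does a single tokenize-and-lookup pass per label (split on ' ' plus one dict get per token).
import Mathlib
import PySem

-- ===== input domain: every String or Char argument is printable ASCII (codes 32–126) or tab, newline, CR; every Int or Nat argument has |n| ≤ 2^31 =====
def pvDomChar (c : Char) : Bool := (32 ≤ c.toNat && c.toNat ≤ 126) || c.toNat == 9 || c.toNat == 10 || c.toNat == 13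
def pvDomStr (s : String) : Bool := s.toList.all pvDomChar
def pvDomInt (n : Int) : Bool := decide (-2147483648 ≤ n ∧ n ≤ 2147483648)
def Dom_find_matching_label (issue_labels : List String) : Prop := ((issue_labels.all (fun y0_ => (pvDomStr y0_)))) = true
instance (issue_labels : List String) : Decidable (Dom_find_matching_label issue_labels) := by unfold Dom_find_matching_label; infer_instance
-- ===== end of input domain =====

-- B replaces A's three nested loops (each label tested against every keyword by padded
-- substring search) with a reverse keyword→category dict built once plus a single
-- tokenize-and-look-up pass per label (objective: alternative data structure).

-- ===== PORT A =====
-- LABEL_KEYWORDS.items() of the module-level dict literal (insertion order)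
def pvLabelKeywords : List (String × List String) :=
  [("bug", ["bug", "defect", "error", "issue"]),
   ("enhancement", ["enhancement", "feature", "feat", "suggestion"]),
   ("documentation", ["documentation", "docs"]),
   ("question", ["question", "help", "support"])]

def find_matching_label (issue_labels : List String) : Option String :=
  let found := issue_labels.foldl (fun found label =>
    let labelLower := PySem.Str.lower label
    pvLabelKeywords.foldl (fun found ckws =>
      ckws.2.foldl (fun found keyword =>
        if PySem.Str.isIn (" " ++ keyword ++ " ") (" " ++ labelLower ++ " ") || (labelLower == keyword)
        then PySem.Set.add found ckws.1 else found) found) found) PySem.Set.empty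
  -- found.pop() on a set known to have exactly one element is that element
  if PySem.Set.len found == 1 then found.head? else none

-- ===== PORT B =====
-- _REVERSE = {kw: cat for cat, kws in LABEL_KEYWORDS.items() for kw in kws}
def pvReverse : PySem.Dict String String :=
  pvLabelKeywords.foldl (fun d ckws => ckws.2.foldl (fun d kw => d.insert kw ckws.1) d) PySem.Dict.empty

def find_matching_label_alt (issue_labels : List String) : Option String :=
  let found := issue_labels.foldl (fun found label =>
    -- label.lower().split(' '): sep " " is nonempty, so split? always returns some
    ((PySem.Str.split? (PySem.Str.lower label) " ").getD []).foldl (fun found token =>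
      match pvReverse.get? token with
      | some cat => PySem.Set.add found cat
      | none => found) found) PySem.Set.empty
  if PySem.Set.len found == 1 then found.head? else none

-- ===== PRECONDITION & SPEC =====
def Spec_find_matching_label (issue_labels : List String) (out : Option String) : Prop := out = find_matching_label_alt issue_labels
instance (issue_labels : List String) (out : Option String) : Decidable (Spec_find_matching_label issue_labels out) := by unfold Spec_find_matching_label; infer_instance

-- ===== CLAIM (what is proved, stated in full; the proofs are below) =====
def Claim_equal_find_matching_label : Prop := ∀ (issue_labels : List String), Dom_find_matching_label issue_labels → Spec_find_matching_label issue_labels (find_matching_label issue_labels)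

-- ===== LEMMAS AND PROOFS =====

-- tokens of l under Python's l.split(' '): structural version of PySem.Chars.splitOn l [' ']
def pvT : List Char → List (List Char)
  | [] => [[]]
  | c :: r =>
    if c = ' ' then [] :: pvT r
    else match pvT r with
      | t :: ts => (c :: t) :: ts
      | [] => [[c]]

theorem pvT_ne_nil (l : List Char) : pvT l ≠ [] := by
  cases l with
  | nil => simp [pvT]
  | cons c r =>
    simp only [pvT]
    split
    · simp
    · split <;> simp

-- prepend p to the head piece (the accumulator shape of splitOn.go)
def pvConsHead (p : List Char) : List (List Char) → List (List Char)
  | [] => [p]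
  | t :: ts => (p ++ t) :: ts

theorem pvGo_eq (l : List Char) : ∀ (fuel : Nat) (cur : List Char) (acc : List (List Char)),
    l.length ≤ fuel →
    PySem.Chars.splitOn.go [' '] fuel l cur acc = acc.reverse ++ pvConsHead cur.reverse (pvT l) := by
  induction l with
  | nil =>
    intro fuel cur acc _
    cases fuel <;> (rw [PySem.Chars.splitOn.go]; simp [pvT, pvConsHead]; try omega)
  | cons c r ih =>
    intro fuel cur acc hf
    cases fuel with
    | zero => simp at hf
    | succ f =>
      by_cases hc : c = ' '
      · subst hc
        rw [PySem.Chars.splitOn.go]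
        simp only [List.isPrefixOf, beq_self_eq_true, Bool.true_and, if_pos]
        rw [show (List.drop [' '].length (' ' :: r)) = r from rfl]
        rw [ih f [] (cur.reverse :: acc) (by simpa using hf)]
        cases hT : pvT r with
        | nil => exact absurd hT (pvT_ne_nil r)
        | cons t ts => simp [pvT, pvConsHead, hT]
      · rw [PySem.Chars.splitOn.go]
        simp only [List.isPrefixOf, Ne.symm hc, false_and, if_neg, beq_iff_eq, Bool.and_eq_true,
          not_false_eq_true]
        rw [ih f (c :: cur) acc (by simpa using Nat.le_of_succ_le_succ hf)]
        cases hT : pvT r with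
        | nil => exact absurd hT (pvT_ne_nil r)
        | cons t ts => simp [pvT, pvConsHead, hT, hc]

theorem splitOn_space (l : List Char) : PySem.Chars.splitOn l [' '] = pvT l := by
  show PySem.Chars.splitOn.go [' '] (l.length + 1) l [] [] = pvT l
  rw [pvGo_eq l (l.length + 1) [] [] (Nat.le_succ _)]
  cases hT : pvT l with
  | nil => exact absurd hT (pvT_ne_nil l)
  | cons t ts => simp [pvConsHead]

-- "kw followed by a space is a prefix of l followed by a space" = kw is l's first token
theorem pvQ_iff (l : List Char) : ∀ (kw : List Char), ' ' ∉ kw →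
    ((kw ++ [' '] <+: l ++ [' ']) ↔ kw = (pvT l).headI) := by
  induction l with
  | nil =>
    intro kw hns
    cases kw with
    | nil => simp [pvT]
    | cons k kw' =>
      have hk : k ≠ ' ' := fun h => hns (h ▸ List.mem_cons_self)
      simp [pvT, List.cons_prefix_cons, hk]
  | cons c r ih =>
    intro kw hns
    by_cases hc : c = ' '
    · subst hc
      cases kw with
      | nil => simp [pvT, List.cons_prefix_cons]
      | cons k kw' =>
        have hk : k ≠ ' ' := fun h => hns (h ▸ List.mem_cons_self)
        simp [pvT, List.cons_prefix_cons, hk]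
    · cases kw with
      | nil =>
        cases hT : pvT r with
        | nil => exact absurd hT (pvT_ne_nil r)
        | cons t ts => simp [pvT, hc, hT, List.cons_prefix_cons, Ne.symm hc]
      | cons k kw' =>
        have hns' : ' ' ∉ kw' := fun h => hns (List.mem_cons_of_mem _ h)
        cases hT : pvT r with
        | nil => exact absurd hT (pvT_ne_nil r)
        | cons t ts =>
          simp [pvT, hc, hT, List.cons_prefix_cons, List.headI, ih kw' hns']

-- padded kw occurs inside l ++ " " = kw is one of the non-first tokens of l
theorem pvR_iff (l : List Char) : ∀ (kw : List Char), kw ≠ [] → ' ' ∉ kw →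
    ((' ' :: (kw ++ [' ']) <:+: l ++ [' ']) ↔ kw ∈ (pvT l).tail) := by
  induction l with
  | nil =>
    intro kw hne hns
    constructor
    · intro h
      have hlen := h.length_le
      simp at hlen
    · intro h; simp [pvT] at h
  | cons c r ih =>
    intro kw hne hns
    by_cases hc : c = ' '
    · subst hc
      rw [show ((' ' :: r : List Char) ++ [' ']) = ' ' :: (r ++ [' ']) from rfl,
        List.infix_cons_iff, List.cons_prefix_cons, pvQ_iff r kw hns, ih kw hne hns]
      cases hT : pvT r with
      | nil => exact absurd hT (pvT_ne_nil r)
      | cons t ts => simp [pvT, hT, List.headI]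
    · rw [show ((c :: r : List Char) ++ [' ']) = c :: (r ++ [' ']) from rfl,
        List.infix_cons_iff, List.cons_prefix_cons, ih kw hne hns]
      cases hT : pvT r with
      | nil => exact absurd hT (pvT_ne_nil r)
      | cons t ts => simp [pvT, hc, hT, Ne.symm hc]

theorem pvMem_iff (l kw : List Char) (hne : kw ≠ []) (hns : ' ' ∉ kw) :
    ((' ' :: (kw ++ [' ']) <:+: ' ' :: (l ++ [' '])) ↔ kw ∈ pvT l) := by
  rw [List.infix_cons_iff, List.cons_prefix_cons, pvQ_iff l kw hns, pvR_iff l kw hne hns]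
  cases hT : pvT l with
  | nil => exact absurd hT (pvT_ne_nil l)
  | cons t ts => simp [List.headI]

-- A's per-keyword test, characterised through tokens
theorem pvMatch_iff (lab kw : String) (hne : kw.toList ≠ []) (hns : ' ' ∉ kw.toList) :
    ((PySem.Str.isIn (" " ++ kw ++ " ") (" " ++ lab ++ " ") || (lab == kw)) = true ↔
      kw.toList ∈ pvT lab.toList) := by
  rw [Bool.or_eq_true, PySem.Str.isIn_iff_infix]
  have hpad : (" " ++ kw ++ " ").toList = ' ' :: (kw.toList ++ [' ']) := by
    simp [String.toList_append]
  have hpad' : (" " ++ lab ++ " ").toList = ' ' :: (lab.toList ++ [' ']) := by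
    simp [String.toList_append]
  rw [hpad, hpad', pvMem_iff lab.toList kw.toList hne hns]
  constructor
  · rintro (h | h)
    · exact h
    · have hlk : lab = kw := by simpa using h
      subst hlk
      exact (pvMem_iff lab.toList lab.toList hne hns).1 (List.infix_refl _)
  · intro h; exact Or.inl h

-- generic membership / nodup through a set-building foldl
theorem pvMem_foldl {β : Type} (g : PySem.Set String → β → PySem.Set String)
    (P : β → String → Prop) :
    ∀ (l : List β), (∀ (s : PySem.Set String) (b : β), b ∈ l → ∀ (x : String),
        (x ∈ g s b ↔ x ∈ s ∨ P b x)) →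
    ∀ (s : PySem.Set String) (x : String),
      (x ∈ l.foldl g s ↔ x ∈ s ∨ ∃ b ∈ l, P b x) := by
  intro l
  induction l with
  | nil => intro _ s x; simp
  | cons b bs ih =>
    intro hg s x
    rw [List.foldl_cons, ih (fun s b' hb' x => hg s b' (List.mem_cons_of_mem _ hb') x),
      hg s b List.mem_cons_self x]
    constructor
    · rintro ((h | h) | ⟨b', hb', h⟩)
      · exact Or.inl h
      · exact Or.inr ⟨b, List.mem_cons_self, h⟩
      · exact Or.inr ⟨b', List.mem_cons_of_mem _ hb', h⟩
    · rintro (h | ⟨b', hb', h⟩)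
      · exact Or.inl (Or.inl h)
      · rcases List.mem_cons.1 hb' with rfl | hb''
        · exact Or.inl (Or.inr h)
        · exact Or.inr ⟨b', hb'', h⟩

theorem pvNodup_foldl {β : Type} (g : PySem.Set String → β → PySem.Set String)
    (hg : ∀ s b, s.Nodup → (g s b).Nodup) :
    ∀ (l : List β) (s : PySem.Set String), s.Nodup → (l.foldl g s).Nodup := by
  intro l
  induction l with
  | nil => intro s hs; exact hs
  | cons b bs ih => intro s hs; exact ih _ (hg s b hs)

-- the categories a single label contributes (same for both programs)
def pvCats (label : String) (c : String) : Prop :=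
  ∃ p ∈ pvLabelKeywords, p.1 = c ∧ ∃ kw ∈ p.2, kw.toList ∈ pvT (PySem.Str.lower label).toList

theorem pvKw_wf : ∀ p ∈ pvLabelKeywords, ∀ kw ∈ p.2, kw.toList ≠ [] ∧ ' ' ∉ kw.toList := by
  decide

-- A's per-label step membership
theorem pvStepA_mem (s : PySem.Set String) (label : String) (x : String) :
    (x ∈ pvLabelKeywords.foldl (fun found ckws =>
        ckws.2.foldl (fun found keyword =>
          if PySem.Str.isIn (" " ++ keyword ++ " ") (" " ++ PySem.Str.lower label ++ " ")
              || (PySem.Str.lower label == keyword)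
          then PySem.Set.add found ckws.1 else found) found) s
      ↔ x ∈ s ∨ pvCats label x) := by
  have hinner : ∀ (s' : PySem.Set String) (ckws : String × List String), ckws ∈ pvLabelKeywords →
      ∀ (y : String),
      (y ∈ ckws.2.foldl (fun found keyword =>
          if PySem.Str.isIn (" " ++ keyword ++ " ") (" " ++ PySem.Str.lower label ++ " ")
              || (PySem.Str.lower label == keyword)
          then PySem.Set.add found ckws.1 else found) s'
        ↔ y ∈ s' ∨ (ckws.1 = y ∧ ∃ kw ∈ ckws.2, kw.toList ∈ pvT (PySem.Str.lower label).toList)) := by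
    intro s' ckws hck
    have hkw : ∀ (s'' : PySem.Set String) (kw : String), kw ∈ ckws.2 → ∀ (y : String),
        (y ∈ (if PySem.Str.isIn (" " ++ kw ++ " ") (" " ++ PySem.Str.lower label ++ " ")
              || (PySem.Str.lower label == kw)
            then PySem.Set.add s'' ckws.1 else s'')
          ↔ y ∈ s'' ∨ (y = ckws.1 ∧ kw.toList ∈ pvT (PySem.Str.lower label).toList)) := by
      intro s'' kw hkwm y
      obtain ⟨hne, hns⟩ := pvKw_wf ckws hck kw hkwm
      by_cases hmatch : (PySem.Str.isIn (" " ++ kw ++ " ") (" " ++ PySem.Str.lower label ++ " ")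
          || (PySem.Str.lower label == kw)) = true
      · rw [if_pos hmatch, PySem.Set.mem_add]
        rw [pvMatch_iff (PySem.Str.lower label) kw hne hns] at hmatch
        tauto
      · rw [if_neg hmatch]
        rw [pvMatch_iff (PySem.Str.lower label) kw hne hns] at hmatch
        tauto
    intro y
    refine (pvMem_foldl _ _ ckws.2 hkw s' y).trans (or_congr_right ?_)
    constructor
    · rintro ⟨kw, hkwm, rfl, h2⟩
      exact ⟨rfl, kw, hkwm, h2⟩
    · rintro ⟨rfl, kw, hkwm, h2⟩
      exact ⟨kw, hkwm, rfl, h2⟩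
  exact pvMem_foldl _ _ pvLabelKeywords hinner s x

-- the reverse dict, evaluated
theorem pvGetMk_iff (l : List (String × String)) (hnd : (l.map Prod.fst).Nodup) (tok c : String) :
    ((PySem.Dict.mk l).get? tok = some c ↔ (tok, c) ∈ l) := by
  induction l with
  | nil => simp [PySem.Dict.get?]
  | cons p rest ih =>
    obtain ⟨k, v⟩ := p
    simp only [List.map_cons, List.nodup_cons, List.mem_map] at hnd
    rw [PySem.Dict.get?_mk_cons]
    by_cases hk : k = tok
    · subst hk
      rw [if_pos (by simp)]
      simp only [Option.some.injEq, List.mem_cons, Prod.mk.injEq, true_and]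
      constructor
      · rintro rfl; exact Or.inl rfl
      · rintro (rfl | h)
        · rfl
        · exact absurd ⟨_, h, rfl⟩ hnd.1
    · rw [if_neg (by simpa using hk)]
      rw [ih hnd.2]
      simp only [List.mem_cons, Prod.mk.injEq]
      constructor
      · exact Or.inr
      · rintro (⟨rfl, -⟩ | h)
        · exact absurd rfl hk
        · exact h

theorem pvRevItems : pvReverse = PySem.Dict.mk
    [("bug","bug"),("defect","bug"),("error","bug"),("issue","bug"),
     ("enhancement","enhancement"),("feature","enhancement"),("feat","enhancement"),("suggestion","enhancement"),
     ("documentation","documentation"),("docs","documentation"),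
     ("question","question"),("help","question"),("support","question")] := rfl

theorem pvRev_get? (tok c : String) :
    (pvReverse.get? tok = some c ↔ ∃ p ∈ pvLabelKeywords, p.1 = c ∧ tok ∈ p.2) := by
  rw [pvRevItems, pvGetMk_iff _ (by decide)]
  constructor
  · intro h
    fin_cases h <;> decide
  · rintro ⟨p, hp, rfl, htok⟩
    simp only [pvLabelKeywords, List.mem_cons, List.not_mem_nil, or_false] at hp
    rcases hp with rfl | rfl | rfl | rfl <;> (fin_cases htok <;> decide)

-- B's token list = pvT of the lowered label
theorem pvTokens_eq (label : String) :
    (PySem.Str.split? (PySem.Str.lower label) " ").getD []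
      = (pvT (PySem.Str.lower label).toList).map String.ofList := by
  have hsep : (" " : String).toList = [' '] := rfl
  simp [PySem.Str.split?, PySem.Chars.split?, hsep, splitOn_space]

-- B's per-label step membership
theorem pvStepB_mem (s : PySem.Set String) (label : String) (x : String) :
    (x ∈ ((PySem.Str.split? (PySem.Str.lower label) " ").getD []).foldl (fun found token =>
        match pvReverse.get? token with
        | some cat => PySem.Set.add found cat
        | none => found) s
      ↔ x ∈ s ∨ pvCats label x) := by
  rw [pvTokens_eq label]
  have htok : ∀ (s' : PySem.Set String) (tok : String),
      tok ∈ (pvT (PySem.Str.lower label).toList).map String.ofList → ∀ (y : String),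
      (y ∈ (match pvReverse.get? tok with
        | some cat => PySem.Set.add s' cat
        | none => s')
        ↔ y ∈ s' ∨ pvReverse.get? tok = some y) := by
    intro s' tok _ y
    cases h : pvReverse.get? tok with
    | none => simp
    | some cat =>
      simp only [PySem.Set.mem_add, Option.some.injEq]
      exact or_congr_right eq_comm
  refine (pvMem_foldl _ _ _ htok s x).trans (or_congr_right ?_)
  constructor
  · rintro ⟨tok, htokm, hget⟩
    rcases List.mem_map.1 htokm with ⟨t, ht, rfl⟩
    rcases (pvRev_get? _ _).1 hget with ⟨p, hp, h1, h2⟩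
    refine ⟨p, hp, h1, String.ofList t, h2, ?_⟩
    rw [String.toList_ofList]
    exact ht
  · rintro ⟨p, hp, h1, kw, hkw, htl⟩
    refine ⟨kw, ?_, (pvRev_get? _ _).2 ⟨p, hp, h1, hkw⟩⟩
    rw [show kw = String.ofList kw.toList from (String.ofList_toList).symm]
    exact List.mem_map_of_mem htl

theorem pvStepA_nodup (s : PySem.Set String) (label : String) (hs : s.Nodup) :
    (pvLabelKeywords.foldl (fun found ckws =>
      ckws.2.foldl (fun found keyword =>
        if PySem.Str.isIn (" " ++ keyword ++ " ") (" " ++ PySem.Str.lower label ++ " ")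
            || (PySem.Str.lower label == keyword)
        then PySem.Set.add found ckws.1 else found) found) s).Nodup := by
  apply pvNodup_foldl _ ?_ _ s hs
  intro s' ckws hs'
  apply pvNodup_foldl _ ?_ _ s' hs'
  intro s'' kw hs''
  split
  · exact PySem.Set.nodup_add _ _ hs''
  · exact hs''

theorem pvStepB_nodup (s : PySem.Set String) (label : String) (hs : s.Nodup) :
    (((PySem.Str.split? (PySem.Str.lower label) " ").getD []).foldl (fun found token =>
      match pvReverse.get? token with
      | some cat => PySem.Set.add found cat
      | none => found) s).Nodup := by
  apply pvNodup_foldl _ ?_ _ _ hs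
  intro s' tok hs'
  cases pvReverse.get? tok
  · exact hs'
  · exact PySem.Set.nodup_add _ _ hs'

-- the common final step depends only on the set of found categories
theorem pvResult_eq (s t : List String) (hs : s.Nodup) (ht : t.Nodup)
    (h : ∀ x, x ∈ s ↔ x ∈ t) :
    (if PySem.Set.len s == 1 then s.head? else none) =
      (if PySem.Set.len t == 1 then t.head? else none) := by
  have hperm : s.Perm t := (List.perm_ext_iff_of_nodup hs ht).2 h
  have hlen : s.length = t.length := hperm.length_eq
  have hsl : PySem.Set.len s = PySem.Set.len t := by simp [PySem.Set.len, hlen]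
  rw [hsl]
  split
  · rename_i h1
    have ht1 : t.length = 1 := by
      simp [PySem.Set.len] at h1
      omega
    match t, ht1 with
    | [b], _ =>
      have hs1 : s.length = 1 := by omega
      match s, hs1 with
      | [a], _ =>
        have hab := (h a).1 (List.mem_singleton.2 rfl)
        simp only [List.mem_singleton] at hab
        simp [hab]
  · rfl

-- ===== VERDICT (by name: the statement is the Claim_ definition above) =====
theorem find_matching_label_spec : Claim_equal_find_matching_label := by
  intro issue_labels _
  unfold Spec_find_matching_label
  simp only [find_matching_label, find_matching_label_alt]
  apply pvResult_eq
  · exact pvNodup_foldl _ (fun s label => pvStepA_nodup s label) issue_labels PySem.Set.empty List.nodup_nil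
  · exact pvNodup_foldl _ (fun s label => pvStepB_nodup s label) issue_labels PySem.Set.empty List.nodup_nil
  · intro x
    exact (pvMem_foldl _ _ issue_labels (fun s label _ x => pvStepA_mem s label x) PySem.Set.empty x).trans
      (pvMem_foldl _ _ issue_labels (fun s label _ x => pvStepB_mem s label x) PySem.Set.empty x).symm
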